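-- pv_equiv track=rewrite | github.com/ankle-stubber/obfuscate | _example/data-anonymizer.py | _detect_json_indent
-- ===== SOURCE A (Python) =====
-- from typing import Dict, Any, List, Tuple, Union, Optional
--
-- def _detect_json_indent(json_str: str) -> Optional[int]:
--     """Detect indentation in a JSON string."""
--     # Default to 2 spaces if indentation can't be detected
--     indent = 2
--
--     lines = json_str.split("\n")
--     if len(lines) > 1:
--         for line in lines[1:]:  # Skip first line
--             if line.strip() and line.startswith(" "):
--                 # Count leading spaces
--                 indent = len(line) - len(line.lstrip(" "))
--                 break
--
--     return indent
-- ===== SOURCE B (Python) =====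
-- def _detect_json_indent(json_str):
--     """Detect indentation in a JSON string: single pass over the characters
--     with a tiny state machine -- no line list is built."""
--     SKIP, COUNT, WS = 0, 1, 2   # SKIP: wait for newline; COUNT: counting leading spaces; WS: spaces seen, then tab/CR
--     state, count = SKIP, 0
--     for ch in json_str:
--         if ch == '\n':
--             state, count = COUNT, 0
--         elif state == COUNT:
--             if ch == ' ':
--                 count += 1
--             elif ch in '\t\r':
--                 state = WS if count else SKIP
--             elif count:
--                 return count
--             else:
--                 state = SKIP
--         elif state == WS and ch not in ' \t\r':
--             return count
--     return 2
-- ===== Notes on version B (the rewrite author's own statement) =====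
-- stated objective: alternative
-- what changed: Replaces split-into-a-list-of-lines with per-line strip()/startswith()/lstrip() passes by a single character-by-character scan driven by a three-state machine that returns at the first indented line.
import Mathlib
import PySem

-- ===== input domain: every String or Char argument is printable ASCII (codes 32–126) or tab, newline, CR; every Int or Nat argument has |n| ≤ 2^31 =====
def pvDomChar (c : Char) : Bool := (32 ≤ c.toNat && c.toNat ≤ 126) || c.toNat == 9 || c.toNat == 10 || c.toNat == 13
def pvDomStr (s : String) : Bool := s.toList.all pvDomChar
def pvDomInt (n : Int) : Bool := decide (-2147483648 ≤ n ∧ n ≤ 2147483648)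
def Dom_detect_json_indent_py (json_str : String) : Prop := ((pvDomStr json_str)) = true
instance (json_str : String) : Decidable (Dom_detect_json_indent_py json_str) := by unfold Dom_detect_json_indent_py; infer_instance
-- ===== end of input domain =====

-- B replaces A's split-into-lines plus per-line strip/startswith/lstrip with a single pass
-- over the characters driven by a three-state machine (alternative decomposition).

-- ===== PORT A =====
-- for line in lines[1:]: the first line passing the test sets indent and breaks
def loopA : List (List Char) → Int → Int
  | [], indent => indent
  | line :: rest, indent =>
    if PySem.Chars.strip line ≠ [] ∧ PySem.Chars.startswith line [' '] then
      -- len(line) - len(line.lstrip(" ")): lstrip with explicit chars " " drops leading ' '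
      -- only; ported by hand as dropWhile (· = ' '), exact for this one-character chars set
      (line.length : Int) - ((line.dropWhile (· = ' ')).length : Int)
    else loopA rest indent

def detect_json_indent_py (json_str : String) : Option Int :=
  let indent : Int := 2
  let lines := PySem.Chars.splitOn json_str.toList ['\n']  -- json_str.split("\n")
  some (if lines.length > 1 then loopA (lines.drop 1) indent else indent)

-- ===== PORT B =====
-- the for-loop of Source B: state 0 = SKIP, 1 = COUNT, 2 = WS; count = leading spaces so far
def scanB : List Char → Nat → Nat → Int
  | [], _, _ => 2
  | ch :: rest, state, count =>
    if ch = '\n' then scanB rest 1 0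
    else if state = 1 then
      if ch = ' ' then scanB rest 1 (count + 1)
      else if ch = '\t' ∨ ch = '\r' then scanB rest (if count ≠ 0 then 2 else 0) count
      else if count ≠ 0 then (count : Int)
      else scanB rest 0 count
    else if state = 2 then
      if ¬ (ch = ' ' ∨ ch = '\t' ∨ ch = '\r') then (count : Int)
      else scanB rest 2 count
    else scanB rest 0 count

def detect_json_indent_py_alt (json_str : String) : Option Int :=
  some (scanB json_str.toList 0 0)

-- ===== PRECONDITION & SPEC =====
def Spec_detect_json_indent_py (json_str : String) (out : Option Int) : Prop := out = detect_json_indent_py_alt json_str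
instance (json_str : String) (out : Option Int) : Decidable (Spec_detect_json_indent_py json_str out) := by unfold Spec_detect_json_indent_py; infer_instance

-- ===== CLAIM (what is proved, stated in full; the proofs are below) =====
def Claim_equal_detect_json_indent_py : Prop := ∀ (json_str : String), Dom_detect_json_indent_py json_str → Spec_detect_json_indent_py json_str (detect_json_indent_py json_str)

-- ===== LEMMAS AND PROOFS =====

def mySplit (pre : List Char) : List Char → List (List Char)
  | [] => [pre]
  | c :: r => if c = '\n' then pre :: mySplit [] r else mySplit (pre ++ [c]) r

lemma go_spec (fuel : Nat) : ∀ (l : List Char), l.length < fuel → ∀ cur acc,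
    PySem.Chars.splitOn.go ['\n'] fuel l cur acc = acc.reverse ++ mySplit cur.reverse l := by
  induction fuel with
  | zero => intro l h; omega
  | succ f ih =>
    intro l h cur acc
    cases l with
    | nil => simp [PySem.Chars.splitOn.go, mySplit]
    | cons c rest =>
      simp only [PySem.Chars.splitOn.go]
      by_cases hc : c = '\n'
      · subst hc
        rw [if_pos (by simp [List.isPrefixOf])]
        simp only [List.length_cons, List.length_nil, List.drop_succ_cons, List.drop_zero]
        rw [ih rest (by simpa using Nat.lt_of_succ_lt_succ h) [] (cur.reverse :: acc)]
        simp [mySplit]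
      · rw [if_neg (by simp [List.isPrefixOf]; exact fun h2 => hc h2.symm)]
        rw [ih rest (by simpa using Nat.lt_of_succ_lt_succ h) (c :: cur) acc]
        simp only [mySplit, if_neg hc, List.reverse_cons]

lemma splitOn_eq (cs : List Char) : PySem.Chars.splitOn cs ['\n'] = mySplit [] cs := by
  rw [PySem.Chars.splitOn, go_spec (cs.length + 1) cs (by omega) [] []]
  simp

def nlSplit : List Char → List (List Char)
  | [] => []
  | c :: r => if c = '\n' then mySplit [] r else nlSplit r

lemma mySplit_head (r : List Char) : ∀ pre,
    mySplit pre r = (pre ++ r.takeWhile (· ≠ '\n')) :: nlSplit r := by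
  induction r with
  | nil => intro pre; simp [mySplit, nlSplit]
  | cons c r ih =>
    intro pre
    by_cases hc : c = '\n'
    · subst hc; simp [mySplit, nlSplit, List.takeWhile_cons]
    · simp only [mySplit, nlSplit, if_neg hc, ih, List.takeWhile_cons, decide_eq_true_eq]
      rw [if_pos hc]
      simp

lemma nlSplit_of_not_mem (r : List Char) (h : '\n' ∉ r) : nlSplit r = [] := by
  induction r with
  | nil => rfl
  | cons c r ih =>
    simp only [nlSplit]
    rw [if_neg (by rintro rfl; exact h (List.mem_cons_self ..))]
    exact ih (fun hm => h (List.mem_cons_of_mem _ hm))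

lemma nlSplit_append (l : List Char) (r : List Char) (h : '\n' ∉ l) :
    nlSplit (l ++ '\n' :: r) = mySplit [] r := by
  induction l with
  | nil => simp [nlSplit]
  | cons c l ih =>
    simp only [List.cons_append, nlSplit]
    rw [if_neg (by rintro rfl; exact h (List.mem_cons_self ..))]
    exact ih (fun hm => h (List.mem_cons_of_mem _ hm))

lemma mySplit_tail (cs : List Char) : ∀ pre, (mySplit pre cs).drop 1 = nlSplit cs := by
  induction cs with
  | nil => intro pre; simp [mySplit, nlSplit]
  | cons c r ih =>
    intro pre
    by_cases hc : c = '\n'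
    · subst hc; simp [mySplit, nlSplit]
    · simp only [mySplit, nlSplit, if_neg hc]; exact ih _

lemma mySplit_len_gt_one (cs : List Char) : ∀ pre, 1 < (mySplit pre cs).length ↔ '\n' ∈ cs := by
  induction cs with
  | nil => intro pre; simp [mySplit]
  | cons c r ih =>
    intro pre
    by_cases hc : c = '\n'
    · subst hc
      have h1 : 0 < (mySplit [] r).length := by rw [mySplit_head r []]; simp
      simp only [mySplit, if_pos rfl, List.length_cons, List.mem_cons]
      simp
      omega
    · simp only [mySplit, if_neg hc, ih, List.mem_cons]
      constructor
      · exact Or.inr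
      · rintro (h | h)
        · exact absurd h.symm hc
        · exact h


abbrev nonWS (c : Char) : Prop := ¬ (c = ' ' ∨ c = '\t' ∨ c = '\r')

-- one-step reduction lemmas for scanB
lemma step_nl (r : List Char) (st c : Nat) : scanB ('\n' :: r) st c = scanB r 1 0 := by
  simp [scanB]

lemma step_0 (a : Char) (r : List Char) (c : Nat) (ha : a ≠ '\n') :
    scanB (a :: r) 0 c = scanB r 0 c := by
  simp [scanB, ha]

lemma step_1_sp (r : List Char) (c : Nat) : scanB (' ' :: r) 1 c = scanB r 1 (c + 1) := by
  simp [scanB]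

lemma step_1_tab (a : Char) (r : List Char) (c : Nat) (ha : a = '\t' ∨ a = '\r') :
    scanB (a :: r) 1 c = scanB r (if c ≠ 0 then 2 else 0) c := by
  rcases ha with rfl | rfl <;> simp [scanB]

lemma step_1_other (a : Char) (r : List Char) (c : Nat) (ha : a ≠ '\n') (hsp : a ≠ ' ')
    (htb : ¬ (a = '\t' ∨ a = '\r')) :
    scanB (a :: r) 1 c = if c ≠ 0 then (c : Int) else scanB r 0 c := by
  have ht : a ≠ '\t' := fun h => htb (Or.inl h)
  have hr : a ≠ '\r' := fun h => htb (Or.inr h)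
  simp [scanB, ha, hsp, ht, hr]

lemma step_2_ws (a : Char) (r : List Char) (c : Nat) (hw : a = ' ' ∨ a = '\t' ∨ a = '\r') :
    scanB (a :: r) 2 c = scanB r 2 c := by
  rcases hw with rfl | rfl | rfl <;> simp [scanB]

lemma step_2_nw (a : Char) (r : List Char) (c : Nat) (ha : a ≠ '\n') (hw : nonWS a) :
    scanB (a :: r) 2 c = (c : Int) := by
  have h3 : ¬ (a = ' ' ∨ a = '\t' ∨ a = '\r') := hw
  simp [scanB, ha, h3]

lemma scanB_tail (t : List Char) (ht : t = [] ∨ ∃ r, t = '\n' :: r) (s c s' c' : Nat) :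
    scanB t s c = scanB t s' c' := by
  rcases ht with rfl | ⟨r, rfl⟩
  · rfl
  · rw [step_nl, step_nl]

lemma scanB_S0 (l : List Char) (h : '\n' ∉ l) (t : List Char) (c : Nat) :
    scanB (l ++ t) 0 c = scanB t 0 c := by
  induction l with
  | nil => rfl
  | cons a l ih =>
    have ha : a ≠ '\n' := by rintro rfl; exact h (List.mem_cons_self ..)
    rw [List.cons_append, step_0 a _ c ha]
    exact ih (fun hm => h (List.mem_cons_of_mem _ hm))

lemma scanB_S2 (l : List Char) (h : '\n' ∉ l) (t : List Char)
    (ht : t = [] ∨ ∃ r, t = '\n' :: r) (c : Nat) :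
    scanB (l ++ t) 2 c = if l.any (fun ch => decide (nonWS ch)) then (c : Int) else scanB t 1 0 := by
  induction l with
  | nil =>
    simp only [List.nil_append, List.any_nil, Bool.false_eq_true, if_false]
    exact scanB_tail t ht 2 c 1 0
  | cons a l ih =>
    have ha : a ≠ '\n' := by rintro rfl; exact h (List.mem_cons_self ..)
    by_cases hw : nonWS a
    · rw [List.cons_append, step_2_nw a _ c ha hw]
      rw [if_pos (by simp only [List.any_cons, Bool.or_eq_true, decide_eq_true_eq]; exact Or.inl hw)]
    · have hw' : a = ' ' ∨ a = '\t' ∨ a = '\r' := not_not.mp hw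
      rw [List.cons_append, step_2_ws a _ c hw',
        ih (fun hm => h (List.mem_cons_of_mem _ hm))]
      have hda : (decide (nonWS a)) = false := by simpa using hw
      simp only [List.any_cons, hda, Bool.false_or]

lemma scanB_S1 (l : List Char) (h : '\n' ∉ l) (t : List Char)
    (ht : t = [] ∨ ∃ r, t = '\n' :: r) :
    ∀ c : Nat, scanB (l ++ t) 1 c =
      if (c + (l.takeWhile (· = ' ')).length ≠ 0) ∧ l.any (fun ch => decide (nonWS ch)) then
        ((c + (l.takeWhile (· = ' ')).length : Nat) : Int)
      else scanB t 1 0 := by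
  induction l with
  | nil =>
    intro c
    simp only [List.nil_append, List.takeWhile_nil, List.any_nil, List.length_nil, Nat.add_zero,
      Bool.false_eq_true, and_false, if_false]
    exact scanB_tail t ht 1 c 1 0
  | cons a l ih =>
    intro c
    have ha : a ≠ '\n' := by rintro rfl; exact h (List.mem_cons_self ..)
    have hl : '\n' ∉ l := fun hm => h (List.mem_cons_of_mem _ hm)
    by_cases hsp : a = ' '
    · subst hsp
      rw [List.cons_append, step_1_sp, ih hl (c + 1)]
      have htw : List.takeWhile (fun x => decide (x = ' ')) (' ' :: l)
          = ' ' :: List.takeWhile (fun x => decide (x = ' ')) l := by simp [List.takeWhile_cons]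
      have hnw : (decide (nonWS ' ')) = false := by simp [nonWS]
      rw [htw]
      simp only [List.any_cons, hnw, Bool.false_or, List.length_cons]
      split_ifs with h1 h2 h2
      · push_cast; omega
      · exact absurd ⟨by omega, h1.2⟩ h2
      · exact absurd ⟨by omega, h2.2⟩ h1
      · rfl
    · have htw : List.takeWhile (fun x => decide (x = ' ')) (a :: l) = [] := by
        simp [List.takeWhile_cons, hsp]
      rw [List.cons_append]
      by_cases hw : nonWS a
      · have htb : ¬ (a = '\t' ∨ a = '\r') := fun hx => hw (Or.inr hx)
        rw [step_1_other a _ c ha hsp htb, htw]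
        have hany : ((a :: l).any fun ch => decide (nonWS ch)) = true := by
          simp only [List.any_cons, Bool.or_eq_true, decide_eq_true_eq]; exact Or.inl hw
        by_cases hc : c ≠ 0
        · rw [if_pos hc, if_pos ⟨by simpa using hc, hany⟩]
          simp
        · push_neg at hc; subst hc
          rw [if_neg (by omega), if_neg (by simp)]
          rw [scanB_S0 l hl t 0]
          exact scanB_tail t ht 0 0 1 0
      · have hw' : a = '\t' ∨ a = '\r' := by
          rcases not_not.mp hw with h1 | h2 | h3
          · exact absurd h1 hsp
          · exact Or.inl h2
          · exact Or.inr h3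
        have hnw : (decide (nonWS a)) = false := by simp [hw]
        rw [step_1_tab a _ c hw', htw]
        simp only [List.any_cons, hnw, Bool.false_or, List.length_nil, Nat.add_zero]
        by_cases hc : c ≠ 0
        · rw [if_pos hc, scanB_S2 l hl t ht c]
          by_cases hany : (l.any fun ch => decide (nonWS ch)) = true
          · rw [if_pos hany, if_pos ⟨hc, hany⟩]
          · rw [if_neg hany, if_neg (fun hx => hany hx.2)]
        · push_neg at hc; subst hc
          rw [if_neg (by omega), scanB_S0 l hl t 0,
            if_neg (fun hx => (by omega : ¬ (0 : Nat) + 0 ≠ 0) (by simpa using hx.1))]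
          exact scanB_tail t ht 0 0 1 0

lemma char_eq_of_toNat (a b : Char) (h : a.toNat = b.toNat) : a = b := by
  apply Char.ext; exact UInt32.toNat_inj.mp h

lemma isspace_dom (c : Char) (hd : pvDomChar c = true) (hn : c ≠ '\n') :
    PySem.Chars.isspace c = !decide (nonWS c) := by
  have h10 : c.toNat ≠ 10 := fun h => hn (char_eq_of_toNat c '\n' (by rw [h]; rfl))
  have hd' : (32 ≤ c.toNat ∧ c.toNat ≤ 126) ∨ c.toNat = 9 ∨ c.toNat = 10 ∨ c.toNat = 13 := by
    have := hd
    simp only [pvDomChar, Bool.or_eq_true, Bool.and_eq_true, decide_eq_true_eq, beq_iff_eq] at this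
    tauto
  have hsp : (c = ' ') ↔ c.toNat = 32 :=
    ⟨fun h => by rw [h]; rfl, fun h => char_eq_of_toNat c ' ' (by rw [h]; rfl)⟩
  have htb : (c = '\t') ↔ c.toNat = 9 :=
    ⟨fun h => by rw [h]; rfl, fun h => char_eq_of_toNat c '\t' (by rw [h]; rfl)⟩
  have hcr : (c = '\r') ↔ c.toNat = 13 :=
    ⟨fun h => by rw [h]; rfl, fun h => char_eq_of_toNat c '\r' (by rw [h]; rfl)⟩
  unfold PySem.Chars.isspace nonWS
  by_cases hws : c.toNat = 32 ∨ c.toNat = 9 ∨ c.toNat = 13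
  · have : (c = ' ' ∨ c = '\t' ∨ c = '\r') := by rw [hsp, htb, hcr]; exact hws
    simp only [decide_not, this, not_true_eq_false, decide_false, Bool.not_not,
      decide_true, Bool.not_false]
    rcases hws with h | h | h <;> simp [h]
  · have : ¬ (c = ' ' ∨ c = '\t' ∨ c = '\r') := by rw [hsp, htb, hcr]; exact hws
    simp only [decide_not, this, not_false_eq_true, decide_true, Bool.not_true, Bool.not_not]
    push_neg at hws
    rcases hd' with ⟨h1, h2⟩ | h | h | h
    · simp only [Bool.or_eq_false_iff, Bool.and_eq_false_iff, decide_eq_false_iff_not]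
      omega
    · omega
    · omega
    · omega

lemma strip_eq_nil_iff (l : List Char) :
    PySem.Chars.strip l = [] ↔ ∀ x ∈ l, PySem.Chars.isspace x = true := by
  unfold PySem.Chars.strip PySem.Chars.rstrip PySem.Chars.lstrip
  rw [List.reverse_eq_nil_iff, List.dropWhile_eq_nil_iff]
  constructor
  · intro h x hx
    by_cases hxs : PySem.Chars.isspace x = true
    · exact hxs
    · have hxd : x ∈ List.dropWhile PySem.Chars.isspace l := by
        have hsplit := List.takeWhile_append_dropWhile (p := PySem.Chars.isspace) (l := l)
        have hx' : x ∈ List.takeWhile PySem.Chars.isspace l ++ List.dropWhile PySem.Chars.isspace l := by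
          rw [hsplit]; exact hx
        rcases List.mem_append.mp hx' with h1 | h1
        · exact absurd (List.mem_takeWhile_imp h1) hxs
        · exact h1
      exact h x (List.mem_reverse.mpr hxd)
  · intro h x hx
    exact h x ((List.dropWhile_sublist _).mem (List.mem_reverse.mp hx))

lemma strip_ne_nil_iff (l : List Char) (hd : ∀ c ∈ l, pvDomChar c = true) (hn : '\n' ∉ l) :
    PySem.Chars.strip l ≠ [] ↔ (l.any fun ch => decide (nonWS ch)) = true := by
  rw [Ne, strip_eq_nil_iff]
  simp only [List.any_eq_true, decide_eq_true_eq]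
  constructor
  · intro h
    push_neg at h
    obtain ⟨x, hx, hxs⟩ := h
    refine ⟨x, hx, ?_⟩
    intro hws
    apply hxs
    rw [isspace_dom x (hd x hx) (fun he => hn (he ▸ hx))]
    simp [nonWS, hws]
  · rintro ⟨x, hx, hxw⟩ h
    have := h x hx
    rw [isspace_dom x (hd x hx) (fun he => hn (he ▸ hx))] at this
    simp [hxw] at this

lemma startswith_space_iff (l : List Char) :
    PySem.Chars.startswith l [' '] = true ↔ (l.takeWhile (· = ' ')).length ≠ 0 := by
  cases l with
  | nil => simp [PySem.Chars.startswith, List.isPrefixOf]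
  | cons a r =>
    by_cases ha : a = ' '
    · subst ha
      simp [PySem.Chars.startswith, List.isPrefixOf, List.takeWhile_cons]
    · have ha2 : ¬ (' ' = a) := fun h => ha h.symm
      simp [PySem.Chars.startswith, List.isPrefixOf, ha, ha2]

lemma lstrip_val (l : List Char) :
    (l.length : Int) - ((l.dropWhile (· = ' ')).length : Int)
      = ((l.takeWhile (· = ' ')).length : Int) := by
  have h := congrArg List.length (List.takeWhile_append_dropWhile (p := (fun x => decide (x = ' '))) (l := l))
  rw [List.length_append] at h
  omega

lemma dropWhile_nl (r : List Char) :
    r.dropWhile (· ≠ '\n') = [] ∨ ∃ r2, r.dropWhile (· ≠ '\n') = '\n' :: r2 := by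
  induction r with
  | nil => exact Or.inl rfl
  | cons a r ih =>
    by_cases ha : a = '\n'
    · subst ha
      exact Or.inr ⟨r, by simp [List.dropWhile_cons]⟩
    · simpa [List.dropWhile_cons, ha] using ih


lemma lineStep (n : Nat) : ∀ (r : List Char), r.length ≤ n → (∀ c ∈ r, pvDomChar c = true) →
    loopA (mySplit [] r) 2 = scanB r 1 0 := by
  induction n with
  | zero =>
    intro r hlen _
    have : r = [] := List.length_eq_zero_iff.mp (Nat.le_zero.mp hlen)
    subst this
    simp [mySplit, loopA, scanB, PySem.Chars.strip, PySem.Chars.lstrip, PySem.Chars.rstrip]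
  | succ n ih =>
    intro r hlen hd
    set l := r.takeWhile (· ≠ '\n') with hldef
    set t := r.dropWhile (· ≠ '\n') with htdef
    have hr : l ++ t = r := List.takeWhile_append_dropWhile
    have hln : '\n' ∉ l := by
      intro hm
      have := List.mem_takeWhile_imp hm
      simp at this
    have hld : ∀ c ∈ l, pvDomChar c = true :=
      fun c hc => hd c (((List.takeWhile_sublist _).mem) hc)
    have ht : t = [] ∨ ∃ r2, t = '\n' :: r2 := dropWhile_nl r
    rw [mySplit_head r [], List.nil_append]
    show loopA (l :: nlSplit r) 2 = scanB r 1 0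
    rw [← hr, scanB_S1 l hln t ht 0]
    have hcond : (PySem.Chars.strip l ≠ [] ∧ PySem.Chars.startswith l [' '] = true)
        ↔ ((0 + (l.takeWhile (· = ' ')).length ≠ 0) ∧ (l.any fun ch => decide (nonWS ch)) = true) := by
      rw [strip_ne_nil_iff l hld hln, startswith_space_iff]
      constructor
      · rintro ⟨h1, h2⟩; exact ⟨by omega, h1⟩
      · rintro ⟨h1, h2⟩; exact ⟨h2, by omega⟩
    simp only [loopA]
    split_ifs with h1 h2 h2
    · rw [lstrip_val]; push_cast; omega
    · exact absurd (hcond.mp ⟨h1.1, by simpa using h1.2⟩) h2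
    · exact absurd (hcond.mpr h2) (by simpa using h1)
    · -- both conditions false: loopA (nlSplit r) 2 = scanB t 1 0
      have hr' : l ++ t = r := hr
      rcases ht with ht0 | ⟨r2, ht2⟩
      · rw [ht0, List.append_nil, nlSplit_of_not_mem l hln]
        rfl
      · rw [ht2, nlSplit_append l r2 hln, step_nl]
        have hlen2 := congrArg List.length hr'
        rw [ht2] at hlen2
        simp at hlen2
        apply ih r2 (by omega)
        intro c hc
        apply hd
        rw [← hr', ht2]
        exact List.mem_append.mpr (Or.inr (List.mem_cons_of_mem _ hc))

lemma state0 (n : Nat) : ∀ (cs : List Char), cs.length ≤ n → (∀ c ∈ cs, pvDomChar c = true) →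
    loopA (nlSplit cs) 2 = scanB cs 0 0 := by
  induction n with
  | zero =>
    intro cs hlen _
    have : cs = [] := List.length_eq_zero_iff.mp (Nat.le_zero.mp hlen)
    subst this
    rfl
  | succ n ih =>
    intro cs hlen hd
    cases cs with
    | nil => rfl
    | cons a r =>
      have hd' : ∀ c ∈ r, pvDomChar c = true := fun c hc => hd c (List.mem_cons_of_mem _ hc)
      by_cases ha : a = '\n'
      · subst ha
        rw [step_nl]
        simp only [nlSplit, if_pos rfl]
        exact lineStep r.length r le_rfl hd'
      · rw [step_0 a r 0 ha]
        simp only [nlSplit, if_neg ha]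
        exact ih r (by simpa using Nat.le_of_succ_le_succ hlen) hd'

lemma port_eq (s : String) (hdom : pvDomStr s = true) :
    detect_json_indent_py s = detect_json_indent_py_alt s := by
  unfold detect_json_indent_py detect_json_indent_py_alt
  have hdom' : ∀ c ∈ s.toList, pvDomChar c = true := by
    simpa [pvDomStr, List.all_eq_true] using hdom
  simp only [splitOn_eq]
  congr 1
  by_cases hgt : 1 < (mySplit [] s.toList).length
  · rw [if_pos hgt, mySplit_tail]
    exact state0 s.toList.length s.toList le_rfl hdom'
  · rw [if_neg hgt]
    have hnm : '\n' ∉ s.toList := fun hm => hgt ((mySplit_len_gt_one _ _).mpr hm)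
    rw [← state0 s.toList.length s.toList le_rfl hdom', nlSplit_of_not_mem _ hnm]
    rfl

-- ===== VERDICT (by name: the statement is the Claim_ definition above) =====
theorem detect_json_indent_py_spec : Claim_equal_detect_json_indent_py := by
  intro json_str hdom
  unfold Spec_detect_json_indent_py
  exact port_eq json_str hdom
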